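-- pv_equiv track=rewrite | github.com/spencerboggs/internships-filter | app.py | merge_internship_data
-- ===== SOURCE A (Python) =====
-- def merge_internship_data(table_data):
--     seen = set()
--     unique_data = []
--     for row in table_data:
--         key = (row["Company"].lower(), row["Role"].lower())
--         if key not in seen:
--             seen.add(key)
--             unique_data.append(row)
--     return unique_data
-- ===== SOURCE B (Python) =====
-- def merge_internship_data(table_data):
--     def key(row):
--         return (row["Company"].lower(), row["Role"].lower())
--     result = []
--     rest = list(table_data)
--     while rest:
--         first = rest[0]
--         result.append(first)
--         k = key(first)
--         rest = [r for r in rest[1:] if key(r) != k]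
--     return result
-- ===== Notes on version B (the rewrite author's own statement) =====
-- stated objective: alternative
-- what changed: Replaces the single pass with a seen-set and membership branch by a purge loop: repeatedly emit the head row and filter every later row with the same lowercased key out of the remaining list, so no seen-set is maintained at all (trades O(n) for O(n*k) worst case). Pre_ only excludes rows lacking a 'Company' or 'Role' key, where both programs raise KeyError.
import Mathlib
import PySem

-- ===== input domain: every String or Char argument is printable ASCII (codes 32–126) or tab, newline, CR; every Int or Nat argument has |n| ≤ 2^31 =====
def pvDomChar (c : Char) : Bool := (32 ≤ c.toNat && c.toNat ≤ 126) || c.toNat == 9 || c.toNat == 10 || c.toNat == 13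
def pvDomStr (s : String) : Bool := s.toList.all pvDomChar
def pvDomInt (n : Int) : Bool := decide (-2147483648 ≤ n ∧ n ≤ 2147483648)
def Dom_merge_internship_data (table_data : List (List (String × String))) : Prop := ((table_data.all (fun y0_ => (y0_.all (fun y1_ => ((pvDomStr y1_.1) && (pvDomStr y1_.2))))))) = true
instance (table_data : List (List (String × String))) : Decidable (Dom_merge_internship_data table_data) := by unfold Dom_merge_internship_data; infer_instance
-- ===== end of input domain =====

-- B replaces A's single pass with a seen-set by a purge loop (emit head, filter its
-- key out of the rest); alternative structure, same results, no seen-set maintained.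


-- shared helper: (row["Company"].lower(), row["Role"].lower()); inside Pre_ both keys
-- are present, so the "" default is never used (it only totalises the port).
def pvRowKey (row : List (String × String)) : String × String :=
  (PySem.Str.lower ((PySem.Dict.mk row).getD "Company" ""),
   PySem.Str.lower ((PySem.Dict.mk row).getD "Role" ""))

-- ===== PORT A =====
def merge_internship_data (table_data : List (List (String × String))) : List (List (String × String)) :=
  (table_data.foldl
    (fun (st : PySem.Set (String × String) × List (List (String × String))) row =>
      let key := pvRowKey row
      if PySem.Set.contains st.1 key then st
      else (PySem.Set.add st.1 key, st.2 ++ [row]))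
    (PySem.Set.empty, [])).2

-- ===== PORT B =====
-- the while-loop of Source B: result accumulator + remaining rows; each step appends the
-- head and removes every later row carrying the head's key.
def pvPurge (result rest : List (List (String × String))) : List (List (String × String)) :=
  match rest with
  | [] => result
  | first :: rest' =>
      pvPurge (result ++ [first]) (rest'.filter (fun r => pvRowKey r ≠ pvRowKey first))
termination_by rest.length
decreasing_by
  simp only [List.length_unattach]
  exact Nat.lt_succ_of_le (le_trans (List.length_filter_le _ _) (by simp))

def merge_internship_data_alt (table_data : List (List (String × String))) : List (List (String × String)) :=
  pvPurge [] table_data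

-- ===== PRECONDITION & SPEC =====
-- Pre_ excludes rows lacking a "Company" or "Role" key: Python raises KeyError there
-- (in A and in B alike).
def Pre_merge_internship_data (table_data : List (List (String × String))) : Prop :=
  ∀ row ∈ table_data,
    (PySem.Dict.mk row).contains "Company" = true ∧
    (PySem.Dict.mk row).contains "Role" = true
instance (table_data : List (List (String × String))) : Decidable (Pre_merge_internship_data table_data) := by unfold Pre_merge_internship_data; infer_instance

def pvWitness_merge_internship_data : (List (List (String × String))) :=
  [[("Company", "Acme"), ("Role", "SWE")], [("Company", "ACME"), ("Role", "swe")]]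

def Spec_merge_internship_data (table_data : List (List (String × String))) (out : List (List (String × String))) : Prop := out = merge_internship_data_alt table_data
instance (table_data : List (List (String × String))) (out : List (List (String × String))) : Decidable (Spec_merge_internship_data table_data out) := by unfold Spec_merge_internship_data; infer_instance

-- ===== CLAIM (what is proved, stated in full; the proofs are below) =====
def Claim_equal_merge_internship_data : Prop := ∀ (table_data : List (List (String × String))), Dom_merge_internship_data table_data → Pre_merge_internship_data table_data → Spec_merge_internship_data table_data (merge_internship_data table_data)

-- ===== LEMMAS AND PROOFS =====

-- Invariant tying the two loops: running A's fold from state (s, out) yields out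
-- followed by the purge of the rows whose key is not yet in s.
theorem pv_loop_inv (l : List (List (String × String))) :
    ∀ (s : PySem.Set (String × String)) (out : List (List (String × String))),
      (l.foldl
        (fun (st : PySem.Set (String × String) × List (List (String × String))) row =>
          let key := pvRowKey row
          if PySem.Set.contains st.1 key then st
          else (PySem.Set.add st.1 key, st.2 ++ [row]))
        (s, out)).2
      = pvPurge out (l.filter (fun r => !(PySem.Set.contains s (pvRowKey r)))) := by
  induction l with
  | nil => intro s out; simp only [List.foldl_nil, List.filter_nil]; rw [pvPurge]
  | cons row rest ih =>
    intro s out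
    simp only [List.foldl_cons, List.filter_cons]
    by_cases h : PySem.Set.contains s (pvRowKey row) = true
    · simp only [h, if_true]
      simpa using ih s out
    · have h' : PySem.Set.contains s (pvRowKey row) = false := by
        cases hc : PySem.Set.contains s (pvRowKey row) <;> simp_all
      simp only [h', Bool.false_eq_true, if_false, Bool.not_false, if_pos trivial]
      rw [ih (PySem.Set.add s (pvRowKey row)) (out ++ [row])]
      rw [pvPurge]
      simp only [List.filter_filter]
      congr 1
      apply List.filter_congr
      intro r _
      by_cases h1 : pvRowKey r = pvRowKey row <;>
        by_cases h2 : pvRowKey r ∈ s <;>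
          simp [PySem.Set.mem_add, h1, h2]

-- ===== VERDICT (by name: the statement is the Claim_ definition above) =====
theorem merge_internship_data_spec : Claim_equal_merge_internship_data := by
  intro table_data _ _
  show _ = merge_internship_data_alt table_data
  unfold merge_internship_data merge_internship_data_alt
  rw [pv_loop_inv table_data PySem.Set.empty []]
  congr 1
  simp [PySem.Set.empty, PySem.Set.contains]
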